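-- pv_equiv track=rewrite | github.com/Edimilton/Projeto-e-Analise-de-Algoritmos | Algoritmos Ordenacao/Q1.py | gotejar
-- ===== SOURCE A (Python) =====
-- def esquerda(pos):
--   return (2 * pos) + 1
--
-- def direita(pos):
--   return 2 * (pos + 1)
--
-- def gotejar(vetor, tamanho, pos):
--   while pos >= 0:
--     controle = -1
--     dir = direita(pos)
--     esq = esquerda(pos)
--
--     if dir < tamanho and vetor[dir][3] < vetor[pos][3]:
--       if vetor[dir][3] <= vetor[esq][3]:
--         if vetor[dir][3] < vetor[esq][3]:
--           controle = dir
--         elif vetor[dir][2] > vetor[esq][2]: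
--           controle = dir
--         else:
--           controle = esq
--       else:
--         controle = esq
--
--     elif esq < tamanho and vetor[esq][3] < vetor[pos][3]:
--       controle = esq
--
--     elif dir < tamanho and vetor[dir][3] == vetor[pos][3]:
--       if vetor[dir][2] > vetor[pos][2]:
--         if vetor[dir][3] == vetor[esq][3]:
--           if vetor[dir][2] > vetor[esq][2]:
--             controle = dir
--           else:
--             controle = esq
--         else:
--           controle = dir
--
--       else:
--         if vetor[esq][3] == vetor[pos][3]:
--           if vetor[esq][2] > vetor[pos][2]:
--             controle = esq
--
--     elif esq < tamanho and vetor[esq][3] == vetor[pos][3]: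
--       if vetor[esq][2] > vetor[pos][2]:
--         controle = esq
--
--     if controle >= 0 :
--       vetor[controle],vetor[pos] = vetor[pos], vetor[controle]
--     pos = controle
--
--   return vetor
-- ===== SOURCE B (Python) =====
-- def _melhor(a, b):
--     return a[3] < b[3] or (a[3] == b[3] and a[2] > b[2])
--
-- def gotejar(vetor, tamanho, pos):
--     if pos < 0:
--         return vetor
--     esq = 2 * pos + 1
--     dir = esq + 1
--     if esq >= tamanho:
--         return vetor
--     filho = dir if dir < tamanho and _melhor(vetor[dir], vetor[esq]) else esq
--     if _melhor(vetor[filho], vetor[pos]):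
--         vetor[filho], vetor[pos] = vetor[pos], vetor[filho]
--         return gotejar(vetor, tamanho, filho)
--     return vetor
-- ===== Notes on version B (the rewrite author's own statement) =====
-- stated objective: simpler
-- what changed: Replaces the while-loop with four tangled elif cascades (12 nested comparisons) by a recursive textbook sift-down: one comparator helper ('better' = smaller key at index 3, ties broken by larger value at index 2), pick the best child (left preferred on full tie), swap and recurse if it beats pos.
import Mathlib
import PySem

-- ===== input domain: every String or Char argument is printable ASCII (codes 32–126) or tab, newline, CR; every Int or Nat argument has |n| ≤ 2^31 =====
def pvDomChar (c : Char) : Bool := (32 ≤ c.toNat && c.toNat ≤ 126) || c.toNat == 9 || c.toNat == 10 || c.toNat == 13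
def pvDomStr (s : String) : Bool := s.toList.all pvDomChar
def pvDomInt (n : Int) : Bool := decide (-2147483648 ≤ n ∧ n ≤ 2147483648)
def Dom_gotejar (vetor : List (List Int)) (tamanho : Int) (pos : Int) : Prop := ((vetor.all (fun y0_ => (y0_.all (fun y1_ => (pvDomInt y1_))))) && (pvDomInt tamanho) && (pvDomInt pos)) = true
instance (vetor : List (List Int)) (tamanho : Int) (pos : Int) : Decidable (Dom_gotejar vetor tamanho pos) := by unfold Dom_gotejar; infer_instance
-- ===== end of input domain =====

-- B replaces A's while-loop with four tangled elif cascades by a recursive textbook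
-- sift-down with one comparator helper (objective: simpler). Both Pythons mutate
-- `vetor` in place by the same swaps; the equivalence proved here is about the
-- returned list value.

-- ===== PORT A =====
def esquerda (pos : Int) : Int := (2 * pos) + 1

def direita (pos : Int) : Int := 2 * (pos + 1)

-- vetor[i][k] (indices are nonnegative here; out-of-range = Python IndexError,
-- excluded by Pre_, defaulted to []/0 in the port)
def pvItem (v : List (List Int)) (i k : Int) : Int :=
  (PySem.List.pyGet? ((PySem.List.pyGet? v i).getD []) k).getD 0

-- one Python row, for the swap assignments
def pvRow (v : List (List Int)) (i : Int) : List Int :=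
  (PySem.List.pyGet? v i).getD []

-- the while-loop of A; fuel is only a totality guard (pos strictly increases and
-- stays < tamanho while ≥ 0, so tamanho.toNat + 2 iterations always suffice)
def gotejarGo (fuel : Nat) (vetor : List (List Int)) (tamanho : Int) (pos : Int) : List (List Int) :=
  match fuel with
  | 0 => vetor
  | Nat.succ fuel =>
    if pos ≥ 0 then
      let dir := direita pos
      let esq := esquerda pos
      let controle : Int :=
        if dir < tamanho ∧ pvItem vetor dir 3 < pvItem vetor pos 3 then
          if pvItem vetor dir 3 ≤ pvItem vetor esq 3 then
            if pvItem vetor dir 3 < pvItem vetor esq 3 then dir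
            else if pvItem vetor dir 2 > pvItem vetor esq 2 then dir
            else esq
          else esq
        else if esq < tamanho ∧ pvItem vetor esq 3 < pvItem vetor pos 3 then esq
        else if dir < tamanho ∧ pvItem vetor dir 3 = pvItem vetor pos 3 then
          if pvItem vetor dir 2 > pvItem vetor pos 2 then
            if pvItem vetor dir 3 = pvItem vetor esq 3 then
              if pvItem vetor dir 2 > pvItem vetor esq 2 then dir else esq
            else dir
          else
            if pvItem vetor esq 3 = pvItem vetor pos 3 then
              if pvItem vetor esq 2 > pvItem vetor pos 2 then esq else (-1 : Int)
            else (-1 : Int)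
        else if esq < tamanho ∧ pvItem vetor esq 3 = pvItem vetor pos 3 then
          if pvItem vetor esq 2 > pvItem vetor pos 2 then esq else (-1 : Int)
        else (-1 : Int)
      let vetor' :=
        if controle ≥ 0 then
          (vetor.set controle.toNat (pvRow vetor pos)).set pos.toNat (pvRow vetor controle)
        else vetor
      gotejarGo fuel vetor' tamanho controle
    else vetor

def gotejar (vetor : List (List Int)) (tamanho : Int) (pos : Int) : List (List Int) :=
  gotejarGo (tamanho.toNat + 2) vetor tamanho pos

-- ===== PORT B =====
-- _melhor(a, b): row a strictly better than row b
def melhor (a b : List Int) : Bool :=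
  decide ((PySem.List.pyGet? a 3).getD 0 < (PySem.List.pyGet? b 3).getD 0 ∨
    ((PySem.List.pyGet? a 3).getD 0 = (PySem.List.pyGet? b 3).getD 0 ∧
     (PySem.List.pyGet? a 2).getD 0 > (PySem.List.pyGet? b 2).getD 0))

-- recursive sift-down of Source B; fuel is only a totality guard (filho > pos, filho
-- < tamanho, so the recursion depth is bounded by tamanho.toNat + 2)
def gotejarAltGo (fuel : Nat) (vetor : List (List Int)) (tamanho : Int) (pos : Int) : List (List Int) :=
  match fuel with
  | 0 => vetor
  | Nat.succ fuel =>
    if pos < 0 then vetor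
    else
      let esq := 2 * pos + 1
      let dir := esq + 1
      if esq ≥ tamanho then vetor
      else
        let filho :=
          if dir < tamanho ∧ melhor (pvRow vetor dir) (pvRow vetor esq) = true then dir else esq
        if melhor (pvRow vetor filho) (pvRow vetor pos) = true then
          gotejarAltGo fuel
            ((vetor.set filho.toNat (pvRow vetor pos)).set pos.toNat (pvRow vetor filho))
            tamanho filho
        else vetor

def gotejar_alt (vetor : List (List Int)) (tamanho : Int) (pos : Int) : List (List Int) :=
  gotejarAltGo (tamanho.toNat + 2) vetor tamanho pos

-- ===== PRECONDITION & SPEC =====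
-- Pre_ excludes inputs on which Python A raises IndexError (a sifted index reaching
-- a row shorter than 4 entries or an index ≥ len(vetor) when tamanho > len(vetor));
-- the bound is conservative: it also excludes some inputs whose sift happens to stop
-- before any bad access, on which both programs return the input unchanged.
def Pre_gotejar (vetor : List (List Int)) (tamanho : Int) (pos : Int) : Prop :=
  pos < 0 ∨ tamanho ≤ 2 * pos + 1 ∨
    ((∀ r ∈ vetor, 4 ≤ (r.length : Int)) ∧ tamanho ≤ (vetor.length : Int))
instance (vetor : List (List Int)) (tamanho : Int) (pos : Int) : Decidable (Pre_gotejar vetor tamanho pos) := by unfold Pre_gotejar; infer_instance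

def pvWitness_gotejar : List (List Int) × Int × Int :=
  ([[0, 0, 0, 5], [0, 0, 1, 1], [0, 0, 2, 1]], 3, 0)

def Spec_gotejar (vetor : List (List Int)) (tamanho : Int) (pos : Int) (out : List (List Int)) : Prop := out = gotejar_alt vetor tamanho pos
instance (vetor : List (List Int)) (tamanho : Int) (pos : Int) (out : List (List Int)) : Decidable (Spec_gotejar vetor tamanho pos out) := by unfold Spec_gotejar; infer_instance

-- ===== CLAIM (what is proved, stated in full; the proofs are below) =====
def Claim_equal_gotejar : Prop := ∀ (vetor : List (List Int)) (tamanho : Int) (pos : Int), Dom_gotejar vetor tamanho pos → Pre_gotejar vetor tamanho pos → Spec_gotejar vetor tamanho pos (gotejar vetor tamanho pos)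

-- ===== LEMMAS AND PROOFS =====

lemma altGo_neg (fuel : Nat) (vetor : List (List Int)) (tamanho pos : Int) (h : pos < 0) :
    gotejarAltGo fuel vetor tamanho pos = vetor := by
  cases fuel with
  | zero => rfl
  | succ n => simp [gotejarAltGo, h]

set_option maxHeartbeats 2000000 in
lemma go_eq (fuel : Nat) : ∀ (vetor : List (List Int)) (tamanho pos : Int),
    gotejarGo fuel vetor tamanho pos = gotejarAltGo fuel vetor tamanho pos := by
  induction fuel with
  | zero => intro v t p; rfl
  | succ n ih =>
    intro v t p
    by_cases hp : p ≥ 0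
    · rw [gotejarGo, gotejarAltGo]
      simp only [hp, if_true, esquerda, direita, melhor, decide_eq_true_eq]
      rw [ih]
      have hd : 2 * (p + 1) = 2 * p + 1 + 1 := by ring
      rw [hd]
      simp only [pvItem, pvRow]
      split_ifs <;>
        first
          | rfl
          | omega
          | (rw [altGo_neg _ _ _ _ (by omega)])
    · rw [gotejarGo, gotejarAltGo]
      simp [hp, show p < 0 by omega]

-- ===== VERDICT (by name: the statement is the Claim_ definition above) =====
theorem gotejar_spec : Claim_equal_gotejar := by
  intro v t p _ _
  unfold Spec_gotejar gotejar gotejar_alt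
  exact go_eq _ v t p
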